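-- pv_equiv track=rewrite | github.com/SrijaGupta/file | NITA/lib/jnpr/toby/trafficgen/ixia/ixload/IxUtils.py | get_agent_args
-- ===== SOURCE A (Python) =====
-- def get_agent_args(value_dict):
--     '''
--         get_agent_args will return agent argument.
--     '''
--     ret_dict = {}
--     activity_list = ['vlanPriority', 'validateCertificate', 'enableDecompressSupport', 'exactTransactions', 'enableHttpsProxy',
--                      'perHeaderPercentDist', 'enableSsl', 'enablePerConnCookieSupport', 'cookieRejectProbability', 'disableMacValidation',
--                      'enableUnidirectionalClose', 'enableAuth', 'piggybackAck', 'httpsTunnel', 'enableEsm',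
--                      'certificate', 'sequentialSessionReuse', 'browserEmulationName', 'enableSslSendCloseNotify', 'cookieJarSize',
--                      'dontUseUpgrade', 'maxPipeline', 'contentLengthDeviationTolerance', 'caCert', 'restObjectType',
--                      'maxSessions', 'enableHttpProxy', 'disableDnsResolutionCache', 'enableTrafficDistributionForCC', 'enableTos',
--                      'precedenceTOS', 'ipPreference', 'maxHeaderLen', 'flowPercentage', 'maxStreams',
--                      'reliabilityTOS', 'sslRecordSize', 'privateKey', 'maxPersistentRequests', 'enablemetaRedirectSupport',
--                      'delayTOS', 'enableIntegrityCheckSupport', 'commandTimeout', 'commandTimeout_ms', 'privateKeyPassword',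
--                      'enableConsecutiveIpsPerSession', 'followHttpRedirects', 'tcpCloseOption', 'enableVlanPriority', 'esm',
--                      'httpVersion', 'enablesslRecordSize', 'sslReuseMethod', 'tcpFastOpen', 'throughputTOS', 'sslVersion', 'enableCookieSupport',
--                      'enableLargeHeader', 'clientCiphers', 'enableHttpsTunnel', 'enableAchieveCCFirst', 'tos',
--                      'httpProxy', 'keepAlive', 'urlStatsCount', 'enableCRCCheckSupport', 'httpsProxy']
--     for key in value_dict:
--         if activity_list.count(key):
--             ret_dict[key] = value_dict[key]
--     for key in activity_list:
--         if key in value_dict.keys():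
--             value_dict.pop(key)
--     return (ret_dict, value_dict)
-- ===== SOURCE B (Python) =====
-- def get_agent_args(value_dict):
--     '''
--         get_agent_args will return agent argument.
--     '''
--     whitelist = frozenset(['vlanPriority', 'validateCertificate', 'enableDecompressSupport', 'exactTransactions', 'enableHttpsProxy',
--                            'perHeaderPercentDist', 'enableSsl', 'enablePerConnCookieSupport', 'cookieRejectProbability', 'disableMacValidation',
--                            'enableUnidirectionalClose', 'enableAuth', 'piggybackAck', 'httpsTunnel', 'enableEsm',
--                            'certificate', 'sequentialSessionReuse', 'browserEmulationName', 'enableSslSendCloseNotify', 'cookieJarSize',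
--                            'dontUseUpgrade', 'maxPipeline', 'contentLengthDeviationTolerance', 'caCert', 'restObjectType',
--                            'maxSessions', 'enableHttpProxy', 'disableDnsResolutionCache', 'enableTrafficDistributionForCC', 'enableTos',
--                            'precedenceTOS', 'ipPreference', 'maxHeaderLen', 'flowPercentage', 'maxStreams',
--                            'reliabilityTOS', 'sslRecordSize', 'privateKey', 'maxPersistentRequests', 'enablemetaRedirectSupport',
--                            'delayTOS', 'enableIntegrityCheckSupport', 'commandTimeout', 'commandTimeout_ms', 'privateKeyPassword',
--                            'enableConsecutiveIpsPerSession', 'followHttpRedirects', 'tcpCloseOption', 'enableVlanPriority', 'esm',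
--                            'httpVersion', 'enablesslRecordSize', 'sslReuseMethod', 'tcpFastOpen', 'throughputTOS', 'sslVersion', 'enableCookieSupport',
--                            'enableLargeHeader', 'clientCiphers', 'enableHttpsTunnel', 'enableAchieveCCFirst', 'tos',
--                            'httpProxy', 'keepAlive', 'urlStatsCount', 'enableCRCCheckSupport', 'httpsProxy'])
--     ret_dict = {}
--     for key in list(value_dict):
--         if key in whitelist:
--             ret_dict[key] = value_dict.pop(key)
--     return (ret_dict, value_dict)
-- ===== Notes on version B (the rewrite author's own statement) =====
-- stated objective: simpler
-- what changed: Replaces A's two passes (a scan over the dict using activity_list.count for each key, then a second scan over the 66-entry activity_list popping matches) by a single pass over the dict keys with a frozenset membership test that collects into ret_dict and pops from value_dict in the same step.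
import Mathlib
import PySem

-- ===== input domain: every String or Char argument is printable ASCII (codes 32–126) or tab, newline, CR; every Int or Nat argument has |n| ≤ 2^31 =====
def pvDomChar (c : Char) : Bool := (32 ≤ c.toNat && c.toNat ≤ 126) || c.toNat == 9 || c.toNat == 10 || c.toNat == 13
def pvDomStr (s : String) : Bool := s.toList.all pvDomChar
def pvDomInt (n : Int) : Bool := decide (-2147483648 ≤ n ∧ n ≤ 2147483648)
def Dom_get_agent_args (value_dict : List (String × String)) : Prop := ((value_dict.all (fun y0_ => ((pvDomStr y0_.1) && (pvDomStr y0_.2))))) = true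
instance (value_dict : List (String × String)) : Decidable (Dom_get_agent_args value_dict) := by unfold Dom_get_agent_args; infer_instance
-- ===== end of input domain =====

-- B fuses A's two passes into one pass over the dict keys with a frozenset membership test,
-- collecting into ret_dict and popping from value_dict in the same step (both A and B mutate
-- the argument dict identically; the theorem is about the returned pair).


-- the whitelist literal shared by both sources (A keeps it as a list, B builds a frozenset of it)
def pvActivityList : List String :=
  ["vlanPriority", "validateCertificate", "enableDecompressSupport", "exactTransactions", "enableHttpsProxy",
   "perHeaderPercentDist", "enableSsl", "enablePerConnCookieSupport", "cookieRejectProbability", "disableMacValidation",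
   "enableUnidirectionalClose", "enableAuth", "piggybackAck", "httpsTunnel", "enableEsm",
   "certificate", "sequentialSessionReuse", "browserEmulationName", "enableSslSendCloseNotify", "cookieJarSize",
   "dontUseUpgrade", "maxPipeline", "contentLengthDeviationTolerance", "caCert", "restObjectType",
   "maxSessions", "enableHttpProxy", "disableDnsResolutionCache", "enableTrafficDistributionForCC", "enableTos",
   "precedenceTOS", "ipPreference", "maxHeaderLen", "flowPercentage", "maxStreams",
   "reliabilityTOS", "sslRecordSize", "privateKey", "maxPersistentRequests", "enablemetaRedirectSupport",
   "delayTOS", "enableIntegrityCheckSupport", "commandTimeout", "commandTimeout_ms", "privateKeyPassword",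
   "enableConsecutiveIpsPerSession", "followHttpRedirects", "tcpCloseOption", "enableVlanPriority", "esm",
   "httpVersion", "enablesslRecordSize", "sslReuseMethod", "tcpFastOpen", "throughputTOS", "sslVersion", "enableCookieSupport",
   "enableLargeHeader", "clientCiphers", "enableHttpsTunnel", "enableAchieveCCFirst", "tos",
   "httpProxy", "keepAlive", "urlStatsCount", "enableCRCCheckSupport", "httpsProxy"]

-- ===== PORT A =====
def get_agent_args (value_dict : List (String × String)) : (List (String × String)) × (List (String × String)) :=
  let vd := PySem.Dict.ofList value_dict
  -- for key in value_dict: if activity_list.count(key): ret_dict[key] = value_dict[key]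
  let ret_dict := vd.keys.foldl
    (fun r key => if pvActivityList.count key ≠ 0 then r.insert key (vd.getD key "") else r)
    PySem.Dict.empty
  -- for key in activity_list: if key in value_dict.keys(): value_dict.pop(key)
  let vd2 := pvActivityList.foldl
    (fun m key => if m.contains key then m.erase key else m) vd
  (ret_dict.items, vd2.items)

-- ===== PORT B =====
def get_agent_args_alt (value_dict : List (String × String)) : (List (String × String)) × (List (String × String)) :=
  let whitelist : PySem.Set String := PySem.Set.ofList pvActivityList
  let vd := PySem.Dict.ofList value_dict
  -- for key in list(value_dict): if key in whitelist: ret_dict[key] = value_dict.pop(key)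
  let st := vd.keys.foldl
    (fun st key =>
      if PySem.Set.contains whitelist key then
        match st.2.pop? key with          -- pop never fails here (key comes from the dict); none-guard only for totality
        | some (v, m) => (st.1.insert key v, m)
        | none => st
      else st)
    (PySem.Dict.empty, vd)
  (st.1.items, st.2.items)

-- ===== PRECONDITION & SPEC =====
def Spec_get_agent_args (value_dict : List (String × String)) (out : (List (String × String)) × (List (String × String))) : Prop := out = get_agent_args_alt value_dict
instance (value_dict : List (String × String)) (out : (List (String × String)) × (List (String × String))) : Decidable (Spec_get_agent_args value_dict out) := by unfold Spec_get_agent_args; infer_instance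

-- ===== CLAIM (what is proved, stated in full; the proofs are below) =====
def Claim_equal_get_agent_args : Prop := ∀ (value_dict : List (String × String)), Dom_get_agent_args value_dict → Spec_get_agent_args value_dict (get_agent_args value_dict)

-- ===== LEMMAS AND PROOFS =====

-- A's first loop: over items with distinct keys, inserting fresh keys appends in order
theorem pvAretLemma (vd : PySem.Dict String String) (l : List (String × String)) (r : PySem.Dict String String)
    (hval : ∀ p ∈ l, vd.getD p.1 "" = p.2)
    (hnd : (l.map Prod.fst).Nodup)
    (hr : ∀ p ∈ l, r.contains p.1 = false) :
    ((l.map Prod.fst).foldl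
      (fun r key => if pvActivityList.count key ≠ 0 then r.insert key (vd.getD key "") else r) r).items
    = r.items ++ l.filter (fun p => decide (pvActivityList.count p.1 ≠ 0)) := by
  induction l generalizing r with
  | nil => simp
  | cons p l ih =>
    simp only [List.map_cons, List.foldl_cons, List.filter_cons]
    have hndl : (l.map Prod.fst).Nodup := hnd.of_cons
    have hne : ∀ q ∈ l, q.1 ≠ p.1 := by
      intro q hq h
      simp only [List.map_cons, List.nodup_cons] at hnd
      exact hnd.1 (h ▸ List.mem_map_of_mem hq)
    have hvall : ∀ q ∈ l, vd.getD q.1 "" = q.2 :=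
      fun q hq => hval q (List.mem_cons_of_mem _ hq)
    by_cases hc : pvActivityList.count p.1 ≠ 0
    · rw [if_pos hc]
      have hfresh : ∀ q ∈ l, (r.insert p.1 (vd.getD p.1 "")).contains q.1 = false := by
        intro q hq
        rw [PySem.Dict.contains_insert]
        simp [hne q hq, hr q (List.mem_cons_of_mem _ hq)]
      rw [ih _ hvall hndl hfresh]
      rw [PySem.Dict.items_insert_of_not_contains _ _ (hr p List.mem_cons_self)]
      rw [hval p List.mem_cons_self]
      simp [hc]
    · rw [if_neg hc]
      rw [ih _ hvall hndl (fun q hq => hr q (List.mem_cons_of_mem _ hq))]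
      simp [hc]

-- A's second loop: repeated conditional erase is one filter
theorem pvAremLemma (ks : List String) (d : PySem.Dict String String) :
    (ks.foldl (fun m key => if m.contains key then m.erase key else m) d).items
    = d.items.filter (fun p => !ks.contains p.1) := by
  induction ks generalizing d with
  | nil => simp
  | cons k ks ih =>
    have hstep : (if d.contains k then d.erase k else d)
        = PySem.Dict.mk (d.items.filter (fun p => !(p.1 == k))) := by
      by_cases h : d.contains k = true
      · simp [h, PySem.Dict.erase]
      · have h2 : ∀ p ∈ d.items, (!(p.1 == k)) = true := by
          intro p hp
          simp only [Bool.not_eq_eq_eq_not, Bool.not_true, beq_eq_false_iff_ne]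
          intro hpk
          have : d.contains k = true := by
            simp [PySem.Dict.contains_iff_mem_keys, PySem.Dict.keys]
            exact ⟨p.2, hpk ▸ (by simpa using hp)⟩
          exact h this
        simp only [h]
        simp [List.filter_eq_self.mpr h2]
    rw [List.foldl_cons, hstep, ih]
    rw [List.filter_filter]
    apply List.filter_congr
    intro p _
    simp [Bool.beq_eq_decide_eq, Bool.and_comm]

-- B's fused loop: one pass splitting the items by whitelist membership
theorem pvBloopLemma (l pre : List (String × String)) (r : PySem.Dict String String)
    (hnd : ((pre ++ l).map Prod.fst).Nodup)
    (hr : ∀ p ∈ l, r.contains p.1 = false) :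
    ((l.map Prod.fst).foldl
      (fun st key =>
        if PySem.Set.contains (PySem.Set.ofList pvActivityList) key then
          match st.2.pop? key with
          | some (v, m) => (st.1.insert key v, m)
          | none => st
        else st)
      (r, PySem.Dict.mk (pre ++ l)))
    = (PySem.Dict.mk (r.items ++ l.filter (fun p => PySem.Set.contains (PySem.Set.ofList pvActivityList) p.1)),
       PySem.Dict.mk (pre ++ l.filter (fun p => !PySem.Set.contains (PySem.Set.ofList pvActivityList) p.1))) := by
  induction l generalizing pre r with
  | nil => simp
  | cons p l ih =>
    obtain ⟨k, v⟩ := p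
    simp only [List.map_cons, List.foldl_cons, List.filter_cons]
    have hnd' := hnd
    rw [List.map_append, List.map_cons] at hnd'
    have hdisj := List.disjoint_of_nodup_append hnd'
    have hcons : (k :: l.map Prod.fst).Nodup := hnd'.of_append_right
    have hne : ∀ q ∈ pre ++ l, q.1 ≠ k := by
      intro q hq h
      rcases List.mem_append.mp hq with hq | hq
      · have hm : q.1 ∈ pre.map Prod.fst := List.mem_map_of_mem (f := Prod.fst) hq
        rw [h] at hm
        exact hdisj hm List.mem_cons_self
      · have hm : q.1 ∈ l.map Prod.fst := List.mem_map_of_mem (f := Prod.fst) hq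
        rw [h] at hm
        exact (List.nodup_cons.mp hcons).1 hm
    have hndl : ((pre ++ l).map Prod.fst).Nodup := by
      have hsub : List.Sublist ((pre ++ l).map Prod.fst) ((pre ++ (k, v) :: l).map Prod.fst) := by
        simp only [List.map_append, List.map_cons]
        exact (List.sublist_cons_self _ _).append_left _
      exact hnd.sublist hsub
    have hget : (PySem.Dict.mk (pre ++ (k, v) :: l)).get? k = some v := by
      apply PySem.Dict.get?_of_mem_items _ (by simp)
      simpa [PySem.Dict.keys] using hnd
    have herase : (PySem.Dict.mk (pre ++ (k, v) :: l)).erase k = PySem.Dict.mk (pre ++ l) := by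
      simp only [PySem.Dict.erase, List.filter_append, List.filter_cons]
      have h1 : pre.filter (fun q => !(q.1 == k)) = pre :=
        List.filter_eq_self.mpr (fun q hq => by
          simpa using hne q (List.mem_append_left _ hq))
      have h2 : l.filter (fun q => !(q.1 == k)) = l :=
        List.filter_eq_self.mpr (fun q hq => by
          simpa using hne q (List.mem_append_right _ hq))
      simp [h1, h2]
    by_cases hc : PySem.Set.contains (PySem.Set.ofList pvActivityList) k = true
    · have hpop : (PySem.Dict.mk (pre ++ (k, v) :: l)).pop? k
          = some (v, PySem.Dict.mk (pre ++ l)) := by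
        simp [PySem.Dict.pop?, hget, herase]
      rw [if_pos hc, hpop]
      have hfresh : ∀ q ∈ l, (r.insert k v).contains q.1 = false := by
        intro q hq
        rw [PySem.Dict.contains_insert]
        simp [hne q (List.mem_append_right _ hq), hr q (List.mem_cons_of_mem _ hq)]
      rw [ih pre (r.insert k v) hndl hfresh]
      rw [PySem.Dict.items_insert_of_not_contains _ _ (hr (k, v) List.mem_cons_self)]
      have hmem : k ∈ pvActivityList := by
        simpa [PySem.Set.contains_iff, PySem.Set.mem_ofList] using hc
      simp [hmem, List.append_assoc]
    · rw [if_neg hc]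
      have hnd2 : (((pre ++ [(k, v)]) ++ l).map Prod.fst).Nodup := by
        simpa [List.append_assoc] using hnd
      have := ih (pre ++ [(k, v)]) r hnd2 (fun q hq => hr q (List.mem_cons_of_mem _ hq))
      rw [show pre ++ (k, v) :: l = (pre ++ [(k, v)]) ++ l by simp] 
      rw [this]
      have hmem : k ∉ pvActivityList := by
        simpa [PySem.Set.contains_iff, PySem.Set.mem_ofList] using hc
      simp [hmem, List.append_assoc]

-- the membership tests of the two ports agree
theorem pvCondEq (k : String) :
    (decide (pvActivityList.count k ≠ 0) : Bool) = PySem.Set.contains (PySem.Set.ofList pvActivityList) k := by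
  by_cases h : k ∈ pvActivityList
  · simp [h, List.count_eq_zero, PySem.Set.mem_ofList]
  · simp [h, List.count_eq_zero, PySem.Set.mem_ofList]

theorem pvContainsEq (k : String) :
    (pvActivityList.contains k : Bool) = PySem.Set.contains (PySem.Set.ofList pvActivityList) k := by
  by_cases h : k ∈ pvActivityList
  · simp [h, PySem.Set.mem_ofList]
  · simp [h, PySem.Set.mem_ofList]

-- ===== VERDICT (by name: the statement is the Claim_ definition above) =====
theorem get_agent_args_spec : Claim_equal_get_agent_args := by
  intro value_dict _
  unfold Spec_get_agent_args get_agent_args get_agent_args_alt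
  have hndk : ((PySem.Dict.ofList value_dict).items.map Prod.fst).Nodup := by
    simpa [PySem.Dict.keys] using PySem.Dict.nodup_keys_ofList value_dict
  have hkeys : (PySem.Dict.ofList value_dict).keys
      = (PySem.Dict.ofList value_dict).items.map Prod.fst := rfl
  have hval : ∀ p ∈ (PySem.Dict.ofList value_dict).items,
      (PySem.Dict.ofList value_dict).getD p.1 "" = p.2 := by
    intro p hp
    obtain ⟨k, v⟩ := p
    exact PySem.Dict.getD_of_mem_items _ hp
      (by simpa [PySem.Dict.keys] using hndk) ""
  have hA1 := pvAretLemma (PySem.Dict.ofList value_dict)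
    (PySem.Dict.ofList value_dict).items PySem.Dict.empty hval hndk
    (fun p _ => PySem.Dict.contains_empty p.1)
  have hA2 := pvAremLemma pvActivityList (PySem.Dict.ofList value_dict)
  have hB := pvBloopLemma (PySem.Dict.ofList value_dict).items [] PySem.Dict.empty
    (by simpa using hndk) (fun p _ => PySem.Dict.contains_empty p.1)
  have hmk : PySem.Dict.mk ([] ++ (PySem.Dict.ofList value_dict).items)
      = PySem.Dict.ofList value_dict := by
    apply PySem.Dict.ext; simp
  rw [hmk] at hB
  simp only [hkeys]
  rw [hA1, hA2, hB]
  have hf : ∀ (X : List (String × String)),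
      X.filter (fun p => decide (pvActivityList.count p.1 ≠ 0))
      = X.filter (fun p => PySem.Set.contains (PySem.Set.ofList pvActivityList) p.1) :=
    fun X => List.filter_congr (fun p _ => pvCondEq p.1)
  have hg : ∀ (X : List (String × String)),
      X.filter (fun p => !pvActivityList.contains p.1)
      = X.filter (fun p => !PySem.Set.contains (PySem.Set.ofList pvActivityList) p.1) :=
    fun X => List.filter_congr (fun p _ => by rw [← pvContainsEq p.1])
  rw [hf, hg, List.nil_append]
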